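-- pv_equiv track=rewrite | github.com/ronair212/LitArt | data_module/genre_data_split.py | genre_split_dic
-- ===== SOURCE A (Python) =====
-- def genre_split_dic(genre_list):
--     genre_dic = {}
--     for i , row in enumerate(genre_list):
--         genres = row.split(', ')
--         for gen in genres:
--             if gen not in genre_dic.keys():
--                 genre_dic[gen] = [i]
--             else:
--                 genre_dic[gen].append(i)
--     return genre_dic
-- ===== SOURCE B (Python) =====
-- def genre_split_dic(genre_list):
--     # Flatten every row into (genre, row-index) pairs, then group: for each
--     # distinct genre (in first-appearance order) collect its indices.
--     pairs = [(g, i) for i, row in enumerate(genre_list) for g in row.split(', ')]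
--     return {g: [i for h, i in pairs if h == g] for g in dict.fromkeys(h for h, _ in pairs)}
-- ===== Notes on version B (the rewrite author's own statement) =====
-- stated objective: alternative
-- what changed: A builds the dict in one pass, appending each index to a per-genre list as tokens arrive; B first flattens all rows into a (genre, index) pair list and then builds the dict by a comprehension that, for each distinct genre in first-appearance order, filters that pair list for its indices.
import Mathlib
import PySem

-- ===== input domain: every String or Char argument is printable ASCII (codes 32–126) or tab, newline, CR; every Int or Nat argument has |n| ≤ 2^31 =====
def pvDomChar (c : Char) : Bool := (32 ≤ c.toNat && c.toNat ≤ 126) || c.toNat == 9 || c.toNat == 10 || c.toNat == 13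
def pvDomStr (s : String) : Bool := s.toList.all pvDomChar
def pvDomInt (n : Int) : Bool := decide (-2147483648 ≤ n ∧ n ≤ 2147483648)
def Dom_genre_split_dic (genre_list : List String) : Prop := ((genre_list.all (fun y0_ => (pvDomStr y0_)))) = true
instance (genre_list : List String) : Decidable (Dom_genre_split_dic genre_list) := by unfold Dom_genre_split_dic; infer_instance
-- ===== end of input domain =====

-- B replaces A's one-pass dict-of-lists build by flattening all rows to (genre, index)
-- pairs and grouping them with a per-genre filter; same return value, no speed claim.

-- ===== PORT A =====
def genre_split_dic (genre_list : List String) : List (String × List Int) :=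
  ((PySem.List.enumerate genre_list).foldl (fun d p =>
      ((PySem.Str.split? p.2 ", ").getD []).foldl (fun d gen =>
        if d.contains gen = false then d.insert gen [p.1]
        else d.modify gen [] (fun v => v ++ [p.1])) d)
    PySem.Dict.empty).items

-- ===== PORT B =====
def genre_split_dic_alt (genre_list : List String) : List (String × List Int) :=
  let pairs : List (String × Int) :=
    (PySem.List.enumerate genre_list).flatMap (fun p =>
      ((PySem.Str.split? p.2 ", ").getD []).map (fun g => (g, p.1)))
  ((PySem.Set.ofList (pairs.map Prod.fst)).foldl (fun d g =>
      d.insert g ((pairs.filter (fun q => q.1 == g)).map Prod.snd))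
    PySem.Dict.empty).items

-- ===== PRECONDITION & SPEC =====
def Spec_genre_split_dic (genre_list : List String) (out : List (String × List Int)) : Prop := out = genre_split_dic_alt genre_list
instance (genre_list : List String) (out : List (String × List Int)) : Decidable (Spec_genre_split_dic genre_list out) := by unfold Spec_genre_split_dic; infer_instance

-- ===== CLAIM (what is proved, stated in full; the proofs are below) =====
def Claim_equal_genre_split_dic : Prop := ∀ (genre_list : List String), Dom_genre_split_dic genre_list → Spec_genre_split_dic genre_list (genre_split_dic genre_list)

-- ===== LEMMAS AND PROOFS =====

def pvPairs (genre_list : List String) : List (String × Int) :=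
  (PySem.List.enumerate genre_list).flatMap (fun p =>
    ((PySem.Str.split? p.2 ", ").getD []).map (fun g => (g, p.1)))

lemma A_fold_eq (gl : List String) :
    (PySem.List.enumerate gl).foldl (fun d p =>
        ((PySem.Str.split? p.2 ", ").getD []).foldl (fun d gen =>
          if d.contains gen = false then d.insert gen [p.1]
          else d.modify gen [] (fun v => v ++ [p.1])) d) PySem.Dict.empty
    = (pvPairs gl).foldl (fun d q => d.modify q.1 [] (fun v => v ++ [q.2])) PySem.Dict.empty := by
  unfold pvPairs
  rw [List.foldl_flatMap]
  apply PySem.List.foldl_congr_mem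
  intro acc p _
  rw [List.foldl_map]
  apply PySem.List.foldl_congr_mem
  intro d gen _
  by_cases h : d.contains gen = true
  · simp [h, PySem.Dict.modify]
  · simp only [Bool.not_eq_true] at h
    simp [h, PySem.Dict.modify, PySem.Dict.getD_of_not_contains d [] h]

lemma A_items (gl : List String) :
    genre_split_dic gl = (PySem.Set.ofList ((pvPairs gl).map Prod.fst)).map
      (fun k => (k, ((pvPairs gl).filter (fun q => q.1 == k)).map (fun q => q.2))) := by
  unfold genre_split_dic
  rw [A_fold_eq]
  have hk : ((pvPairs gl).foldl (fun d q => d.modify q.1 [] fun v => v ++ [q.2]) PySem.Dict.empty).keys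
      = PySem.Set.ofList ((pvPairs gl).map Prod.fst) := by
    rw [PySem.Dict.keys_foldl_modify_key (pvPairs gl) Prod.fst [] (fun _ q v => v ++ [q.2]) PySem.Dict.empty]
    simp [PySem.Set.ofList_eq_foldl, PySem.Set.update, PySem.Dict.keys_empty]
  have hnd : ((pvPairs gl).foldl (fun d q => d.modify q.1 [] fun v => v ++ [q.2]) PySem.Dict.empty).keys.Nodup := by
    apply PySem.Dict.nodup_keys_foldl_modify_key (pvPairs gl) Prod.fst [] (fun _ q v => v ++ [q.2]) PySem.Dict.empty
    simp [PySem.Dict.keys_empty]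
  rw [PySem.Dict.items_eq_map_keys _ hnd [], hk]
  apply List.map_congr_left
  intro k _
  rw [PySem.Dict.getD_foldl_modify_append]
  simp [PySem.Dict.getD_empty]

lemma B_items (gl : List String) :
    genre_split_dic_alt gl = (PySem.Set.ofList ((pvPairs gl).map Prod.fst)).map
      (fun k => (k, ((pvPairs gl).filter (fun q => q.1 == k)).map (fun q => q.2))) := by
  have hb : genre_split_dic_alt gl
      = ((PySem.Set.ofList ((pvPairs gl).map Prod.fst)).foldl (fun d g =>
          d.insert g (((pvPairs gl).filter (fun q => q.1 == g)).map Prod.snd))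
        PySem.Dict.empty).items := rfl
  rw [hb]
  rw [PySem.Dict.items_foldl_insert_fresh _ (fun g => g)
      (fun g => ((pvPairs gl).filter (fun q => q.1 == g)).map Prod.snd) PySem.Dict.empty
      (by intro a _; simp [PySem.Dict.contains_empty])
      (by simp)]
  have he : (PySem.Dict.empty : PySem.Dict String (List Int)).items = [] := rfl
  rw [he, List.nil_append]

-- ===== VERDICT (by name: the statement is the Claim_ definition above) =====
theorem genre_split_dic_spec : Claim_equal_genre_split_dic := by
  intro gl _
  unfold Spec_genre_split_dic
  rw [A_items, B_items]
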